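-- pv_equiv track=rewrite | github.com/Piyuuxh/EvenString | evenstring.py | evenstring
-- ===== SOURCE A (Python) =====
-- def evenstring(s):
--     vowels = set('aeiouuAEIOU')
--     count = 0
--     n = len(s)
--
--     for i in range(n//2):
--         if s[i] in vowels:
--             count += 1
--
--         if s[i + n//2] in vowels:
--             count -= 1
--
--     return count == 0
-- ===== SOURCE B (Python) =====
-- def evenstring(s):
--     vowels = set('aeiouAEIOU')
--     half = len(s) // 2
--     i, j = 0, half
--     while True:
--         while i < half and s[i] not in vowels:
--             i += 1
--         while j < 2 * half and s[j] not in vowels: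
--             j += 1
--         if i == half and j == 2 * half:
--             return True
--         if i == half or j == 2 * half:
--             return False
--         i += 1
--         j += 1
-- ===== Notes on version B (the rewrite author's own statement) =====
-- stated objective: alternative
-- what changed: Replaces A's fused counting loop with a signed counter by a two-pointer scan that pairs off vowels from the two halves one-for-one and early-exits on the first unmatched vowel; no count is kept.
import Mathlib
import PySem

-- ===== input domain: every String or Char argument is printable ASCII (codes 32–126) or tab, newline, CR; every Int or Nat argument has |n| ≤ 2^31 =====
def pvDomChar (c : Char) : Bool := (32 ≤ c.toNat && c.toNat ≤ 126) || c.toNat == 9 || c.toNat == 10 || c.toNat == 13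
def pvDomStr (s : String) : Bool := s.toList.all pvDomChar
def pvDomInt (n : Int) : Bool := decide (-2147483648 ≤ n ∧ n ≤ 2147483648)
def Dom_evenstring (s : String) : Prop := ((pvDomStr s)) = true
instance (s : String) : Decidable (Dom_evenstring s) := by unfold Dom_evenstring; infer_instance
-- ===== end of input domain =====

-- B replaces A's signed-counter loop by a two-pointer vowel-pairing scan with early exit (objective: alternative).

-- ===== PORT A =====
-- Port of A: one fused pass over range(n//2) with a signed counter (+1 first-half vowel, -1 second-half vowel).
def evenstring (s : String) : Bool :=
  let vowels : PySem.Set Char := PySem.Set.ofList "aeiouuAEIOU".toList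
  let n : Int := PySem.Str.len s
  let count : Int :=
    (PySem.List.pyRange 0 (PySem.Int.floordiv n 2) 1).foldl
      (fun count i =>
        let count := if vowels.contains ((PySem.Str.pyGet? s i).getD ' ') then count + 1 else count
        if vowels.contains ((PySem.Str.pyGet? s (i + PySem.Int.floordiv n 2)).getD ' ') then count - 1 else count)
      0
  count == 0

-- ===== PORT B =====
-- B's two pointers i (into s[:half]) and j (into s[half:2*half]) are ported as the two remaining
-- suffix lists: each `i += 1` / `j += 1` of Source B is one `cons`-step dropped here — step-for-step, exact.
-- the inner `while i < half and s[i] not in vowels: i += 1` loops of Source B: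
def skipVow (v : PySem.Set Char) : List Char → List Char
  | [] => []
  | c :: cs => if v.contains c then c :: cs else skipVow v cs

theorem skipVow_length_le (v : PySem.Set Char) (xs : List Char) :
    (skipVow v xs).length ≤ xs.length := by
  induction xs with
  | nil => simp [skipVow]
  | cons c cs ih => simp only [skipVow]; split <;> simp <;> omega

-- the outer `while True` loop of Source B:
def cancelVow (v : PySem.Set Char) (xs ys : List Char) : Bool :=
  match h1 : skipVow v xs, h2 : skipVow v ys with
  | [], [] => true
  | [], _ :: _ => false
  | _ :: _, [] => false
  | _ :: xs', _ :: ys' => cancelVow v xs' ys'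
termination_by xs.length + ys.length
decreasing_by
  have hx : (skipVow v xs).length ≤ xs.length := skipVow_length_le v xs
  have hy : (skipVow v ys).length ≤ ys.length := skipVow_length_le v ys
  rw [h1] at hx; rw [h2] at hy
  simp at hx hy; omega

def evenstring_alt (s : String) : Bool :=
  let vowels : PySem.Set Char := PySem.Set.ofList "aeiouAEIOU".toList
  let half : Nat := s.toList.length / 2
  cancelVow vowels
    (PySem.List.slice s.toList none (some (half : Int)))
    (PySem.List.slice s.toList (some (half : Int)) (some ((2 * half : Nat) : Int)))

-- ===== PRECONDITION & SPEC =====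
def Spec_evenstring (s : String) (out : Bool) : Prop := out = evenstring_alt s
instance (s : String) (out : Bool) : Decidable (Spec_evenstring s out) := by unfold Spec_evenstring; infer_instance

-- ===== CLAIM (what is proved, stated in full; the proofs are below) =====
def Claim_equal_evenstring : Prop := ∀ (s : String), Dom_evenstring s → Spec_evenstring s (evenstring s)

-- ===== LEMMAS AND PROOFS =====

theorem skipVow_countP (v : PySem.Set Char) (xs : List Char) :
    (skipVow v xs).countP (fun c => v.contains c) = xs.countP (fun c => v.contains c) := by
  induction xs with
  | nil => rfl
  | cons c cs ih =>
    simp only [skipVow]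
    split
    · rfl
    · rw [ih, List.countP_cons]; simp_all

theorem skipVow_head_vow (v : PySem.Set Char) (xs : List Char) (c : Char) (cs : List Char)
    (h : skipVow v xs = c :: cs) : v.contains c = true := by
  induction xs with
  | nil => simp [skipVow] at h
  | cons a as ih =>
    simp only [skipVow] at h
    split at h
    · cases h; assumption
    · exact ih h

-- cancelVow decides whether the two lists hold equally many vowels.
theorem cancelVow_eq_countP (v : PySem.Set Char) (xs ys : List Char) :
    cancelVow v xs ys =
      (xs.countP (fun c => v.contains c) == ys.countP (fun c => v.contains c)) := by
  fun_induction cancelVow v xs ys with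
  | case1 xs ys h1 h2 =>
    rw [← skipVow_countP v xs, ← skipVow_countP v ys, h1, h2]
    simp
  | case2 xs ys y ys' h1 h2 =>
    rw [← skipVow_countP v xs, ← skipVow_countP v ys, h1, h2]
    have hy := skipVow_head_vow v ys y ys' h2
    simp only [List.countP_nil, List.countP_cons, hy, if_true]
    simp
  | case3 xs ys x xs' h1 h2 =>
    rw [← skipVow_countP v xs, ← skipVow_countP v ys, h1, h2]
    have hx := skipVow_head_vow v xs x xs' h1
    simp only [List.countP_nil, List.countP_cons, hx, if_true]
    simp
  | case4 xs ys x xs' y ys' h1 h2 ih =>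
    rw [← skipVow_countP v xs, ← skipVow_countP v ys, h1, h2, ih]
    have hx := skipVow_head_vow v xs x xs' h1
    have hy := skipVow_head_vow v ys y ys' h2
    simp only [List.countP_cons, hx, hy, if_true]
    rw [Bool.eq_iff_iff]
    simp only [beq_iff_eq]
    constructor <;> intro hc <;> omega

-- A's duplicated-'u' vowel literal denotes the same set as B's.
theorem vowels_eq :
    PySem.Set.ofList "aeiouuAEIOU".toList = PySem.Set.ofList "aeiouAEIOU".toList := by decide

-- The fused loop up to bound k computes (vowels in l.take k) - (vowels in (l.drop h).take k).
theorem evenstring_loop_eq (p : Char → Bool) (l : List Char) (h k : Nat)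
    (hk : k ≤ h) (hh : 2 * h ≤ l.length) :
    (PySem.List.pyRange 0 (k : Int) 1).foldl
      (fun count i =>
        if p ((PySem.Chars.pyGet? l (i + (h : Int))).getD ' ')
        then (if p ((PySem.Chars.pyGet? l i).getD ' ') then count + 1 else count) - 1
        else (if p ((PySem.Chars.pyGet? l i).getD ' ') then count + 1 else count))
      0
    = ((l.take k).countP p : Int) - (((l.drop h).take k).countP p : Int) := by
  induction k with
  | zero => simp [PySem.List.pyRange_one_eq_nil]
  | succ k ih =>
    have hk' : k ≤ h := Nat.le_of_succ_le hk
    have hkl : k < l.length := by omega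
    have hkhl : k + h < l.length := by omega
    have hcast : ((k + 1 : Nat) : Int) = (k : Int) + 1 := by push_cast; ring
    rw [hcast, PySem.List.pyRange_one_succ_right (by positivity), List.foldl_append, ih hk']
    have h1 : PySem.Chars.pyGet? l (k : Int) = some l[k] :=
      PySem.List.pyGet?_ofNat (h := hkl)
    have h2 : PySem.Chars.pyGet? l ((k : Int) + (h : Int)) = some l[k + h] := by
      have : ((k : Int) + (h : Int)) = ((k + h : Nat) : Int) := by push_cast; ring
      rw [this]
      exact PySem.List.pyGet?_ofNat (h := hkhl)
    have ht1 : l.take (k + 1) = l.take k ++ [l[k]] := by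
      rw [List.take_add_one, List.getElem?_eq_getElem hkl]; rfl
    have hd : k < (l.drop h).length := by simp; omega
    have ht2 : (l.drop h).take (k + 1) = (l.drop h).take k ++ [(l.drop h)[k]] := by
      rw [List.take_add_one, List.getElem?_eq_getElem hd]; rfl
    have hdr : (l.drop h)[k] = l[k + h] := by
      rw [List.getElem_drop]; congr 1; omega
    simp only [List.foldl_cons, List.foldl_nil, h1, h2, ht1, ht2, hdr,
      List.countP_append, List.countP_cons, List.countP_nil, Option.getD_some]
    split_ifs <;> push_cast <;> ring

theorem evenstring_eq_alt (s : String) : evenstring s = evenstring_alt s := by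
  unfold evenstring evenstring_alt
  have hlen : PySem.Str.len s = (s.toList.length : Int) := PySem.Str.len_eq s
  have hfd : PySem.Int.floordiv (s.toList.length : Int) 2 = ((s.toList.length / 2 : Nat) : Int) :=
    PySem.Int.floordiv_natCast s.toList.length 2
  simp only [hlen, hfd, vowels_eq,
    show ∀ (s : String) (i : Int), PySem.Str.pyGet? s i = PySem.Chars.pyGet? s.toList i from
      fun _ _ => rfl]
  rw [evenstring_loop_eq (p := fun c => (PySem.Set.ofList "aeiouAEIOU".toList).contains c)
      (l := s.toList) (h := s.toList.length / 2) (k := s.toList.length / 2) le_rfl (by omega)]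
  rw [cancelVow_eq_countP, PySem.List.slice_to_natCast, PySem.List.slice_natCast]
  have h2h : (2 * (s.toList.length / 2) - s.toList.length / 2 : Nat) = s.toList.length / 2 := by omega
  rw [h2h, Bool.eq_iff_iff]
  simp only [beq_iff_eq, sub_eq_zero]
  constructor <;> intro hx
  · exact_mod_cast hx
  · exact_mod_cast hx

-- ===== VERDICT (by name: the statement is the Claim_ definition above) =====
theorem evenstring_spec : Claim_equal_evenstring := by
  intro s _
  unfold Spec_evenstring
  exact evenstring_eq_alt s
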